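-- pv_equiv track=rewrite | github.com/tangent2018/SFZcode_Recognization | ocr_number_MNIST.py | positions_sort_fn
-- ===== SOURCE A (Python) =====
-- def positions_sort_fn(positions):
--   #将positions从小到大排序
--   sort_dict = {}
--   sort_pos0 = []
--   sort_ret = []
--   for pos in positions:
--     sort_dict[pos[0]] = positions.index(pos)
--     sort_pos0.append(pos[0])
--   sort_pos0.sort()
--   for pos0 in sort_pos0:
--    sort_ret.append(positions[sort_dict[pos0]])
--   return sort_ret
-- ===== SOURCE B (Python) =====
-- def positions_sort_fn(positions):
--     return sorted(positions, key=lambda p: p[0])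
-- ===== Notes on version B (the rewrite author's own statement) =====
-- stated objective: idiomatic
-- what changed: A builds a key->index dict with a quadratic positions.index() scan and re-indexes the list per sorted key; B is the one-line stable sort by first coordinate. Pre_ excludes inputs with an empty inner list (A raises IndexError) and lists with duplicate first-coordinates, on which A's dict-overwrite representative (last element repeated) is accidental.
-- outside the precondition, e.g. on positions_sort_fn([[1, 2], [1, 3]]): A returns [[1, 3], [1, 3]], B returns [[1, 2], [1, 3]]
import Mathlib
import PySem

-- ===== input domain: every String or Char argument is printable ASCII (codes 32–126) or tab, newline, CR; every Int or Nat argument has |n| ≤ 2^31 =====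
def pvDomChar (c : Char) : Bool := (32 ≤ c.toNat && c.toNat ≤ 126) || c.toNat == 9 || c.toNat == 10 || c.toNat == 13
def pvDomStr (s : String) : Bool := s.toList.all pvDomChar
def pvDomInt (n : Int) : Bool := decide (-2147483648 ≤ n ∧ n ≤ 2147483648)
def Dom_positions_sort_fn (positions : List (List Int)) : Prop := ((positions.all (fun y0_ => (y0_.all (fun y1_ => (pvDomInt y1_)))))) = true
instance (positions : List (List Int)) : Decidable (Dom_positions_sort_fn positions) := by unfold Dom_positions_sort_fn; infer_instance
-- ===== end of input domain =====

-- B replaces A's key->index dict built with a positions.index() scan and per-key re-indexing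
-- by the idiomatic one-line stable sort by first coordinate (return value only; A mutates nothing).

-- ===== PORT A =====
def positions_sort_fn (positions : List (List Int)) : List (List Int) :=
  let st := positions.foldl
    (fun (st : PySem.Dict Int Int × List Int) pos =>
      (st.1.insert (PySem.List.pyGetD pos 0 0) (((PySem.List.index? positions pos).getD 0 : Nat) : Int),
       st.2 ++ [PySem.List.pyGetD pos 0 0]))
    (PySem.Dict.empty, [])
  (PySem.List.sorted st.2 (fun x => x) false).foldl
    (fun ret pos0 => ret ++ [PySem.List.pyGetD positions (st.1.getD pos0 0) []]) []

-- ===== PORT B =====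
def positions_sort_fn_alt (positions : List (List Int)) : List (List Int) :=
  PySem.List.sorted positions (fun p => PySem.List.pyGetD p 0 0) false

-- ===== PRECONDITION & SPEC =====
-- Pre_ excludes inputs containing an empty inner list, on which Python's pos[0] raises IndexError,
-- and lists with duplicate first-coordinates, on which A's dict-overwrite representative
-- (the last element of each first-coordinate, repeated) is accidental.
def Pre_positions_sort_fn (positions : List (List Int)) : Prop :=
  (∀ p ∈ positions, p ≠ []) ∧ (positions.map (fun p => PySem.List.pyGetD p 0 0)).Nodup
instance (positions : List (List Int)) : Decidable (Pre_positions_sort_fn positions) := by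
  unfold Pre_positions_sort_fn; infer_instance
def pvWitness_positions_sort_fn : List (List Int) := [[2, 9], [0, 3], [1, 5]]

def Spec_positions_sort_fn (positions : List (List Int)) (out : List (List Int)) : Prop := out = positions_sort_fn_alt positions
instance (positions : List (List Int)) (out : List (List Int)) : Decidable (Spec_positions_sort_fn positions out) := by unfold Spec_positions_sort_fn; infer_instance

-- ===== CLAIM (what is proved, stated in full; the proofs are below) =====
def Claim_equal_positions_sort_fn : Prop := ∀ (positions : List (List Int)), Dom_positions_sort_fn positions → Pre_positions_sort_fn positions → Spec_positions_sort_fn positions (positions_sort_fn positions)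

-- ===== LEMMAS AND PROOFS =====

-- the first element, as both ports read it
def pvKey (p : List Int) : Int := PySem.List.pyGetD p 0 0

-- the element A's dict lookup at key k resolves to: last element of positions whose key is k
def pvRep (positions : List (List Int)) (k : Int) : List Int :=
  (positions.reverse.find? (fun q => pvKey q == k)).getD []

-- A key-indexed insert loop: the final value at k comes from the LAST element whose key is k.
theorem pv_getD_foldl_insert_key {ν : Type} (f : List Int → ν)
    (l : List (List Int)) (d : PySem.Dict Int ν) (k : Int) (d0 : ν) :
    (l.foldl (fun d p => d.insert (pvKey p) (f p)) d).getD k d0 =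
      (l.reverse.find? (fun p => pvKey p == k)).elim (d.getD k d0) f := by
  induction l using List.reverseRecOn generalizing d with
  | nil => simp
  | append_singleton l p ih =>
    rw [List.foldl_append]
    simp only [List.foldl_cons, List.foldl_nil, List.reverse_append, List.reverse_cons,
      List.reverse_nil, List.nil_append, List.cons_append, List.find?_cons]
    by_cases h : pvKey p = k
    · simp [h]
    · have hb : (pvKey p == k) = false := by simp [h]
      simp [hb, PySem.Dict.getD_insert, Ne.symm h, ih]

-- A's stored index fetches back exactly the found element.
theorem pv_lookupA (positions : List (List Int)) (p : List Int) (hmem : p ∈ positions) :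
    PySem.List.pyGetD positions (((PySem.List.index? positions p).getD 0 : Nat) : Int) [] = p := by
  obtain ⟨j, hj⟩ : ∃ j, PySem.List.index? positions p = some j :=
    Option.isSome_iff_exists.mp ((PySem.List.index?_isSome_iff _ _).mpr hmem)
  obtain ⟨hlt, hget, -⟩ := PySem.List.getElem_of_index?_eq_some hj
  rw [hj]
  simp [PySem.List.pyGetD_natCast, List.getD_eq_getElem?_getD, List.getElem?_eq_getElem hlt, hget]

theorem pvRep_spec (positions : List (List Int)) (k : Int)
    (hk : k ∈ positions.map pvKey) :
    pvRep positions k ∈ positions ∧ pvKey (pvRep positions k) = k := by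
  obtain ⟨q, hq, hqk⟩ := List.mem_map.mp hk
  obtain ⟨p, hfind⟩ : ∃ p, positions.reverse.find? (fun q => pvKey q == k) = some p :=
    Option.isSome_iff_exists.mp (List.find?_isSome.mpr
      ⟨q, List.mem_reverse.mpr hq, by simp [hqk]⟩)
  unfold pvRep
  rw [hfind]
  refine ⟨List.mem_reverse.mp (List.mem_of_find?_eq_some hfind), ?_⟩
  have := List.find?_some hfind
  simpa using this

-- with distinct keys, pvRep is a left inverse of pvKey on positions
theorem pvRep_key (positions : List (List Int))
    (hnd : (positions.map pvKey).Nodup) (p : List Int) (hp : p ∈ positions) :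
    pvRep positions (pvKey p) = p := by
  have hk : pvKey p ∈ positions.map pvKey := List.mem_map_of_mem hp
  obtain ⟨hmem, hkey⟩ := pvRep_spec positions (pvKey p) hk
  have hinj := List.inj_on_of_nodup_map hnd
  exact hinj hmem hp hkey

-- B's sort equals A's: sorted keys mapped through the (unique) representative
theorem pv_alt_eq (positions : List (List Int))
    (hnd : (positions.map pvKey).Nodup) :
    positions_sort_fn_alt positions
      = (PySem.List.sorted (positions.map pvKey) (fun x => x) false).map (pvRep positions) := by
  unfold positions_sort_fn_alt
  have hSperm : (PySem.List.sorted (positions.map pvKey) (fun x => x) false).Perm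
      (positions.map pvKey) := PySem.List.sorted_perm _ _ _
  have hSnd : (PySem.List.sorted (positions.map pvKey) (fun x => x) false).Nodup :=
    hSperm.symm.nodup hnd
  have hle := PySem.List.sorted_pairwise (positions.map pvKey) (fun x => x)
  have hSlt : (PySem.List.sorted (positions.map pvKey) (fun x => x) false).Pairwise (· < ·) :=
    (hSnd.and hle).imp (fun h => lt_of_le_of_ne h.2 h.1)
  have hmap : (positions.map pvKey).map (pvRep positions) = positions := by
    rw [List.map_map]
    exact (List.map_congr_left (fun p hp => pvRep_key positions hnd p hp)).trans (by simp)
  have hperm : (((PySem.List.sorted (positions.map pvKey) (fun x => x) false).map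
      (pvRep positions))).Perm positions := (hSperm.map (pvRep positions)).trans (by rw [hmap])
  have hpw : ((PySem.List.sorted (positions.map pvKey) (fun x => x) false).map
      (pvRep positions)).Pairwise
      (fun a b => PySem.List.pyGetD a 0 0 < PySem.List.pyGetD b 0 0) := by
    rw [List.pairwise_map]
    refine List.Pairwise.imp_of_mem ?_ hSlt
    intro a b ha hb hab
    have hka := (pvRep_spec positions a (hSperm.subset ha)).2
    have hkb := (pvRep_spec positions b (hSperm.subset hb)).2
    show pvKey (pvRep positions a) < pvKey (pvRep positions b)
    rw [hka, hkb]; exact hab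
  exact PySem.List.sorted_eq_of_perm_of_pairwise_lt positions _ _ hperm hpw

theorem pv_main (positions : List (List Int))
    (hnd : (positions.map pvKey).Nodup) :
    positions_sort_fn positions = positions_sort_fn_alt positions := by
  unfold positions_sort_fn
  rw [PySem.List.foldl_prod_mk
        (fun (d : PySem.Dict Int Int) pos =>
          d.insert (PySem.List.pyGetD pos 0 0) (((PySem.List.index? positions pos).getD 0 : Nat) : Int))
        (fun (acc : List Int) pos => acc ++ [PySem.List.pyGetD pos 0 0]) positions PySem.Dict.empty []]
  simp only [PySem.List.foldl_append_singleton_eq_map, List.nil_append]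
  rw [pv_alt_eq positions hnd,
    show (fun x => PySem.List.pyGetD x 0 0) = pvKey from rfl]
  apply List.map_congr_left
  intro k hk
  have hkmem : k ∈ positions.map pvKey := by
    rw [PySem.List.mem_sorted] at hk
    simpa [pvKey] using hk
  obtain ⟨q, hq, hqk⟩ := List.mem_map.mp hkmem
  obtain ⟨p, hfind⟩ : ∃ p, positions.reverse.find? (fun q => pvKey q == k) = some p :=
    Option.isSome_iff_exists.mp (List.find?_isSome.mpr
      ⟨q, List.mem_reverse.mpr hq, by simp [hqk]⟩)
  have hpmem : p ∈ positions := List.mem_reverse.mp (List.mem_of_find?_eq_some hfind)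
  have hdict := pv_getD_foldl_insert_key
    (fun pos => (((PySem.List.index? positions pos).getD 0 : Nat) : Int))
    positions PySem.Dict.empty k 0
  simp only [pvKey] at hdict hfind
  rw [hdict, hfind, Option.elim_some, pv_lookupA positions p hpmem]
  unfold pvRep
  rw [show (fun q => pvKey q == k) = (fun q => PySem.List.pyGetD q 0 0 == k) from rfl, hfind,
    Option.getD_some]

-- ===== VERDICT (by name: the statement is the Claim_ definition above) =====
theorem positions_sort_fn_spec : Claim_equal_positions_sort_fn := by
  intro positions _ hpre
  unfold Spec_positions_sort_fn
  exact pv_main positions hpre.2
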